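-- pv_equiv track=rewrite | github.com/RamzesXX/code_advent_2024 | code_advent_2024/tasks/task_19.py | _mormalize_available_patterns
-- ===== SOURCE A (Python) =====
-- def _mormalize_available_patterns(available_patterns: tuple[str]) -> dict[str, list[str]]:
--     available_patterns = sorted(available_patterns, key=len)
--     mormalized_available_patterns = {}
--     for available_pattern in available_patterns:
--         if not _check_if_design_can_be_built(mormalized_available_patterns, available_pattern):
--             mormalized_available_patterns.setdefault(
--                 available_pattern[0], []).append(available_pattern)
--     mormalized_available_patterns = {
--         key: sorted(value)
--         for key, value in mormalized_available_patterns.items()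
--     }
--
--     return mormalized_available_patterns
--
-- def _check_if_design_can_be_built(available_patterns: dict[str, list[str]], design: str) -> bool:
--     used_patterns = []
--
--     pointer = 0
--     index = 0
--     while pointer < len(design):
--         if pointer < 0:
--             return False
--         letter = design[pointer]
--         if letter not in available_patterns:
--             if not used_patterns:
--                 return False
--             index, used_pattern = used_patterns.pop(-1)
--             index += 1
--             pointer -= len(used_pattern)
--             continue
--
--         available_patterns_for_letter = available_patterns.get(letter)
--         if index >= len(available_patterns_for_letter):
--             if not used_patterns:
--                 return False
--             index, used_pattern = used_patterns.pop(-1)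
--             index += 1
--             pointer -= len(used_pattern)
--             continue
--
--         pattern = available_patterns_for_letter[index]
--         if design[pointer:].startswith(pattern):
--             used_patterns.append((index, pattern))
--             pointer += len(pattern)
--             index = 0
--             continue
--
--         index += 1
--     return True
-- ===== SOURCE B (Python) =====
-- def _mormalize_available_patterns(available_patterns: tuple[str]) -> dict[str, list[str]]:
--     kept = []
--     for pattern in sorted(available_patterns, key=len):
--         if not _can_build(pattern, kept):
--             kept.append(pattern)
--     grouped = {}
--     for pattern in kept:
--         grouped.setdefault(pattern[0], []).append(pattern)
--     return {key: sorted(value) for key, value in grouped.items()}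
--
-- def _can_build(design: str, patterns: list[str]) -> bool:
--     # dp[k] == True  iff  the length-k suffix of design is a concatenation of patterns
--     n = len(design)
--     dp = [True]
--     for k in range(1, n + 1):
--         i = n - k
--         dp.append(any(design[i:].startswith(p) and dp[k - len(p)] for p in patterns))
--     return dp[n]
-- ===== Notes on version B (the rewrite author's own statement) =====
-- stated objective: alternative
-- what changed: The buildability check is a bottom-up dynamic program over suffix lengths (dp[k] = the length-k suffix is a concatenation of kept patterns) instead of A's index-stack backtracking search, and the keep-decision runs against a flat kept-list that is grouped by first letter once at the end instead of threading the grouped dict through the scan; the dp avoids the backtracking search's worst-case exponential re-exploration, at the price of always filling the whole table.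
import Mathlib
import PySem

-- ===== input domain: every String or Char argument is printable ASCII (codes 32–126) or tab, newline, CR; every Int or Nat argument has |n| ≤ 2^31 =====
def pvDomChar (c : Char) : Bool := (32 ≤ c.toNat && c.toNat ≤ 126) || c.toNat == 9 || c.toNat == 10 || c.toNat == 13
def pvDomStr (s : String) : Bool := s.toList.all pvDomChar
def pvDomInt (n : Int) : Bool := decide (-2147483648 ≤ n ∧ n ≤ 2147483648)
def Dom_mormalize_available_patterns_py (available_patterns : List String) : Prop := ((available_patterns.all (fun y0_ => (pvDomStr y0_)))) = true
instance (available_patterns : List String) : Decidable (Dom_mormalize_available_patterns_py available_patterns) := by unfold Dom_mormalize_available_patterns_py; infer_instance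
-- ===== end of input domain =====

-- B (objective: alternative) replaces A's backtracking buildability check by a dynamic program
-- over suffixes and separates the keep-decision (flat kept-list) from the first-letter grouping,
-- which happens once at the end; the return values are proved identical on every input.
-- Python's one-character strings s[i]/p[0] are modelled by PySem as Char; the dict keyed by them
-- is Char-keyed internally and its keys are rendered back to the one-character String at the
-- end, in both ports alike.

-- ===== PORT A =====
/-- The while-loop of `_check_if_design_can_be_built`, step for step.  `fuel` only makes the
    recursion structural; the fuel passed by `pvCheckA` is proved sufficient below, so the
    `fuel = 0` branch is never taken. -/
def pvCheckLoop (d : PySem.Dict Char (List String)) (design : String) :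
    Nat → List (Int × String) → Int → Int → Bool
  | 0, _, _, _ => false
  | fuel+1, used, pointer, index =>
    if pointer < PySem.Str.len design then
      if pointer < 0 then false
      else
        match PySem.Str.pyGet? design pointer with
        | none => false   -- unreachable: 0 ≤ pointer < len(design)
        | some letter =>
          if !(d.contains letter) then
            -- `if not used_patterns: return False` and `used_patterns.pop(-1)`:
            -- pop? returns none exactly on the empty list
            match PySem.List.pop? used with
            | none => false
            | some ((i, up), rest) =>
                pvCheckLoop d design fuel rest (pointer - PySem.Str.len up) (i + 1)
          else
            let lst := (d.get? letter).getD []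
            if PySem.List.len lst ≤ index then
              match PySem.List.pop? used with
              | none => false
              | some ((i, up), rest) =>
                  pvCheckLoop d design fuel rest (pointer - PySem.Str.len up) (i + 1)
            else
              match PySem.List.pyGet? lst index with
              | none => false   -- unreachable: 0 ≤ index < len(lst)
              | some pat =>
                if PySem.Str.startswith (PySem.Str.slice design (some pointer) none) pat then
                  pvCheckLoop d design fuel (used ++ [(index, pat)])
                    (pointer + PySem.Str.len pat) 0
                else
                  pvCheckLoop d design fuel used pointer (index + 1)
    else true

/-- port of `_check_if_design_can_be_built` -/
def pvCheckA (d : PySem.Dict Char (List String)) (design : String) : Bool :=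
  pvCheckLoop d design
    (((d.values.map List.length).sum + 3) ^ (design.toList.length + 1) + 1) [] 0 0

def mormalize_available_patterns_py (available_patterns : List String) : List (String × List String) :=
  let sortedPats := PySem.List.sorted available_patterns (fun s => PySem.Str.len s)
  let d := sortedPats.foldl
    (fun d p =>
      if !(pvCheckA d p) then
        -- mormalized_available_patterns.setdefault(available_pattern[0], []).append(available_pattern)
        match PySem.Str.pyGet? p 0 with
        | none => d   -- unreachable: the check returns True on ""
        | some c => d.modify c [] (· ++ [p])
      else d)
    (PySem.Dict.empty : PySem.Dict Char (List String))
  d.items.map (fun kv => (String.singleton kv.1, PySem.List.sorted kv.2 (fun v => v)))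

-- ===== PORT B =====
/-- port of B's `_can_build`: dp over suffix lengths, dp[k] = suffix of length k is buildable.
    The dp lookup `dp[k - len(p)]` is guarded by the preceding startswith (Python short-circuit),
    so the total `pyGetD … false` is only read in range. -/
def pvCanBuild (design : String) (patterns : List String) : Bool :=
  let n : Int := PySem.Str.len design
  let dp := (PySem.List.pyRange 1 (n + 1) 1).foldl
    (fun (dp : List Bool) k =>
      let i := n - k
      dp ++ [patterns.any (fun p =>
        PySem.Str.startswith (PySem.Str.slice design (some i) none) p
          && PySem.List.pyGetD dp (k - PySem.Str.len p) false)])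
    [true]
  PySem.List.pyGetD dp n false

def mormalize_available_patterns_py_alt (available_patterns : List String) : List (String × List String) :=
  let kept := (PySem.List.sorted available_patterns (fun s => PySem.Str.len s)).foldl
    (fun kept p => if !(pvCanBuild p kept) then kept ++ [p] else kept) []
  let grouped := kept.foldl
    (fun d p =>
      match PySem.Str.pyGet? p 0 with
      | none => d   -- unreachable: kept patterns are nonempty
      | some c => d.modify c [] (· ++ [p]))
    (PySem.Dict.empty : PySem.Dict Char (List String))
  grouped.items.map (fun kv => (String.singleton kv.1, PySem.List.sorted kv.2 (fun v => v)))

-- ===== PRECONDITION & SPEC =====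
def Spec_mormalize_available_patterns_py (available_patterns : List String) (out : List (String × List String)) : Prop := out = mormalize_available_patterns_py_alt available_patterns
instance (available_patterns : List String) (out : List (String × List String)) : Decidable (Spec_mormalize_available_patterns_py available_patterns out) := by unfold Spec_mormalize_available_patterns_py; infer_instance

-- ===== CLAIM (what is proved, stated in full; the proofs are below) =====
def Claim_equal_mormalize_available_patterns_py : Prop := ∀ (available_patterns : List String), Dom_mormalize_available_patterns_py available_patterns → Spec_mormalize_available_patterns_py available_patterns (mormalize_available_patterns_py available_patterns)

-- ===== LEMMAS AND PROOFS =====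

-- ---- abstract segmentability (shared spec for both ports) ----

/-- `design[q:].startswith(p)` at the char-list level -/
def pvSW (cs : List Char) (q : Nat) (p : List Char) : Bool := PySem.Chars.startswith (cs.drop q) p

/-- fuelled "the suffix of `cs` from `q` is a concatenation of patterns drawn from `P`",
    where `P q` is the pattern pool consulted at position `q`. -/
def pvGen (cs : List Char) (P : Nat → List (List Char)) : Nat → Nat → Bool
  | 0, q => decide (cs.length ≤ q)
  | f+1, q => decide (cs.length ≤ q) ||
      (P q).any (fun p => pvSW cs q p && pvGen cs P f (q + p.length))

def pvCan (cs : List Char) (P : Nat → List (List Char)) (q : Nat) : Bool :=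
  pvGen cs P (cs.length + 1) q

/-- result of A's search when it stands at `q` about to try pattern indices ≥ `idx` -/
def pvTry (cs : List Char) (P : Nat → List (List Char)) (q idx : Nat) : Bool :=
  ((P q).drop idx).any (fun p => pvSW cs q p && pvCan cs P (q + p.length))

/-- result of A's machine from a full backtracking state (stack reversed: top first) -/
def pvRes (cs : List Char) (P : Nat → List (List Char)) :
    List (Nat × List Char) → Nat → Nat → Bool
  | [], q, idx => pvTry cs P q idx
  | (i, p) :: rest, q, idx => pvTry cs P q idx || pvRes cs P rest (q - p.length) (i + 1)

def pvResT (cs : List Char) (P : Nat → List (List Char))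
    (rstack : List (Nat × List Char)) (q idx : Nat) : Bool :=
  if cs.length ≤ q then true else pvRes cs P rstack q idx

def pvHneP (P : Nat → List (List Char)) : Prop := ∀ q p, p ∈ P q → p ≠ []

def pvHneD (d : PySem.Dict Char (List String)) : Prop :=
  ∀ c v, d.get? c = some v → ∀ p ∈ v, p ≠ ""

/-- the pattern pool A's check consults: the dict entry of the letter at position q -/
def pvPd (d : PySem.Dict Char (List String)) (cs : List Char) : Nat → List (List Char) :=
  fun q => (match cs[q]? with | some c => d.getD c [] | none => []).map String.toList

def pvKey (p : String) : Char := p.toList.headI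

def pvGroupD (kept : List String) : PySem.Dict Char (List String) :=
  kept.foldl (fun d p => d.modify (pvKey p) [] (· ++ [p])) PySem.Dict.empty

def pvK (d : PySem.Dict Char (List String)) : Nat := (d.values.map List.length).sum
def pvB (d : PySem.Dict Char (List String)) : Nat := pvK d + 3

def pvAbstr (used : List (Int × String)) : List (Nat × List Char) :=
  (used.map (fun e => (e.1.toNat, e.2.toList))).reverse

def pvVaux (B : Nat) : Nat → List (Nat × List Char) → Nat
  | _, [] => 0
  | e, (i, _) :: rest => (i + 1) * B ^ e + pvVaux B (e + 1) rest

def pvV (B n : Nat) (rstack : List (Nat × List Char)) (idx : Nat) : Nat :=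
  (idx + 1) * B ^ (n - rstack.length - 1) + pvVaux B (n - rstack.length) rstack

-- ---- stability / unfolding of pvGen ----

lemma pvGen_succ_eq (cs : List Char) (P : Nat → List (List Char)) (hne : pvHneP P) :
    ∀ f q, cs.length ≤ q + f → pvGen cs P (f+1) q = pvGen cs P f q := by
  intro f
  induction f with
  | zero =>
    intro q h
    have hq : cs.length ≤ q := by omega
    simp [pvGen, hq]
  | succ f ih =>
    intro q h
    by_cases hq : cs.length ≤ q
    · simp [pvGen, hq]
    · simp only [pvGen]
      congr 1
      apply PySem.List.any_congr_mem
      intro p hp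
      by_cases hsw : pvSW cs q p = true
      · rw [hsw]
        simp only [Bool.true_and]
        have hp1 : 1 ≤ p.length := List.length_pos_of_ne_nil (hne q p hp)
        exact ih (q + p.length) (by omega)
      · rw [Bool.not_eq_true] at hsw
        rw [hsw]
        simp

lemma pvGen_stable (cs : List Char) (P : Nat → List (List Char)) (hne : pvHneP P) :
    ∀ f q, cs.length ≤ q + f → pvGen cs P f q = pvCan cs P q := by
  have hadd : ∀ j f q, cs.length ≤ q + f → pvGen cs P (f + j) q = pvGen cs P f q := by
    intro j
    induction j with
    | zero => intro f q _; rfl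
    | succ j ih =>
      intro f q h
      have := pvGen_succ_eq cs P hne (f + j) q (by omega)
      rw [show f + (j+1) = (f + j) + 1 by omega, this, ih f q h]
  intro f q h
  rcases le_total f (cs.length + 1) with hf | hf
  · have := hadd (cs.length + 1 - f) f q h
    rw [pvCan, show cs.length + 1 = f + (cs.length + 1 - f) by omega, this]
  · have := hadd (f - (cs.length + 1)) (cs.length + 1) q (by omega)
    rw [pvCan, ← this, show cs.length + 1 + (f - (cs.length + 1)) = f by omega]

lemma pvCan_of_ge (cs : List Char) (P : Nat → List (List Char)) (q : Nat)
    (h : cs.length ≤ q) : pvCan cs P q = true := by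
  simp [pvCan, pvGen, h]

lemma pvCan_unfold (cs : List Char) (P : Nat → List (List Char)) (hne : pvHneP P) (q : Nat) :
    pvCan cs P q = (decide (cs.length ≤ q) ||
      (P q).any (fun p => pvSW cs q p && pvCan cs P (q + p.length))) := by
  conv_lhs => rw [pvCan, pvGen]
  congr 1
  apply PySem.List.any_congr_mem
  intro p _
  congr 1
  exact pvGen_stable cs P hne cs.length (q + p.length) (by omega)

lemma pvCan_eq_try (cs : List Char) (P : Nat → List (List Char)) (hne : pvHneP P) (q : Nat)
    (hq : q < cs.length) : pvCan cs P q = pvTry cs P q 0 := by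
  rw [pvCan_unfold cs P hne q, pvTry, List.drop_zero]
  simp [Nat.not_le.mpr hq]

lemma pvTry_succ (cs : List Char) (P : Nat → List (List Char)) (q idx : Nat) (p : List Char)
    (h : (P q)[idx]? = some p) :
    pvTry cs P q idx = ((pvSW cs q p && pvCan cs P (q + p.length)) || pvTry cs P q (idx+1)) := by
  have hlt : idx < (P q).length := by
    rcases List.getElem?_eq_some_iff.mp h with ⟨hlt, _⟩
    exact hlt
  have hdrop := List.drop_eq_getElem_cons hlt
  rcases List.getElem?_eq_some_iff.mp h with ⟨_, hval⟩
  rw [pvTry, hdrop, hval, List.any_cons, pvTry]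

lemma pvTry_empty (cs : List Char) (P : Nat → List (List Char)) (q idx : Nat)
    (h : (P q).length ≤ idx) : pvTry cs P q idx = false := by
  rw [pvTry, List.drop_eq_nil_of_le h, List.any_nil]

lemma pvRes_congr_try (cs : List Char) (P : Nat → List (List Char))
    (rstack : List (Nat × List Char)) (q idx idx' : Nat)
    (h : pvTry cs P q idx = pvTry cs P q idx') :
    pvRes cs P rstack q idx = pvRes cs P rstack q idx' := by
  cases rstack with
  | nil => simpa [pvRes] using h
  | cons e rest => obtain ⟨i, r⟩ := e; simp only [pvRes, h]

/-- pushing a matching pattern does not change the machine's final answer -/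
lemma pvRes_push (cs : List Char) (P : Nat → List (List Char)) (hne : pvHneP P)
    (rstack : List (Nat × List Char)) (q idx : Nat) (p : List Char)
    (hq : q < cs.length) (hp : (P q)[idx]? = some p) (hsw : pvSW cs q p = true) :
    pvResT cs P rstack q idx = pvResT cs P ((idx, p) :: rstack) (q + p.length) 0 := by
  unfold pvResT
  rw [if_neg (by omega)]
  by_cases hend : cs.length ≤ q + p.length
  · rw [if_pos hend]
    have htry : pvTry cs P q idx = true := by
      rw [pvTry_succ cs P q idx p hp, hsw, pvCan_of_ge cs P _ hend]
      simp
    cases rstack with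
    | nil => simpa [pvRes] using htry
    | cons e rest => obtain ⟨i, r⟩ := e; simp [pvRes, htry]
  · rw [if_neg hend]
    have hq' : q + p.length < cs.length := by omega
    have htry : pvTry cs P q idx = (pvTry cs P (q + p.length) 0 || pvTry cs P q (idx+1)) := by
      rw [pvTry_succ cs P q idx p hp, hsw, pvCan_eq_try cs P hne _ hq']
      simp
    cases rstack with
    | nil =>
      simp only [pvRes, Nat.add_sub_cancel]
      rw [htry]
    | cons e rest =>
      obtain ⟨i, r⟩ := e
      simp only [pvRes, Nat.add_sub_cancel]
      rw [htry, Bool.or_assoc]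

-- ---- the measure ----

lemma pvVaux_bound (B K : Nat) (hB : B = K + 3) (rstack : List (Nat × List Char))
    (hi : ∀ e ∈ rstack, e.1 ≤ K) :
    ∀ ex, pvVaux B ex rstack + B ^ ex ≤ B ^ (ex + rstack.length) := by
  induction rstack with
  | nil => intro ex; simp [pvVaux]
  | cons e rest ih =>
    obtain ⟨i, r⟩ := e
    intro ex
    have hiK : i ≤ K := hi (i, r) (by simp)
    have h1 := ih (fun e he => hi e (List.mem_cons_of_mem _ he)) (ex + 1)
    simp only [pvVaux, List.length_cons]
    have h2 : (i + 1) * B ^ ex + B ^ ex ≤ (K + 2) * B ^ ex := by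
      have he : (i + 1) * B ^ ex + B ^ ex = (i + 2) * B ^ ex := by ring
      rw [he]
      exact Nat.mul_le_mul_right _ (by omega)
    have h3 : (K + 2) * B ^ ex + B ^ ex ≤ B ^ (ex + 1) := by
      rw [pow_succ, hB]
      exact le_of_eq (by ring)
    calc (i + 1) * B ^ ex + pvVaux B (ex + 1) rest + B ^ ex
        = ((i + 1) * B ^ ex + B ^ ex) + pvVaux B (ex + 1) rest := by ring
      _ ≤ (K + 2) * B ^ ex + pvVaux B (ex + 1) rest := Nat.add_le_add_right h2 _
      _ ≤ B ^ (ex + 1) + pvVaux B (ex + 1) rest :=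
          Nat.add_le_add_right (le_trans (Nat.le_add_right _ _) h3) _
      _ = pvVaux B (ex + 1) rest + B ^ (ex + 1) := by ring
      _ ≤ B ^ (ex + 1 + rest.length) := h1
      _ = B ^ (ex + (rest.length + 1)) := by ring_nf

lemma pvV_lt (B K n : Nat) (hB : B = K + 3) (rstack : List (Nat × List Char)) (idx : Nat)
    (hk : rstack.length < n) (hi : ∀ e ∈ rstack, e.1 ≤ K) (hidx : idx ≤ K + 1) :
    pvV B n rstack idx < B ^ n := by
  set k := rstack.length with hkdef
  have hbound := pvVaux_bound B K hB rstack hi (n - k)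
  have hnk : n - k + k = n := by omega
  rw [hnk] at hbound
  have hB1 : 1 ≤ B ^ (n - k - 1) := Nat.one_le_pow _ _ (by omega)
  have hstep : (idx + 1) * B ^ (n - k - 1) + B ^ (n - k - 1) ≤ B ^ (n - k) := by
    have : (idx + 1) * B ^ (n - k - 1) + B ^ (n - k - 1) = (idx + 2) * B ^ (n - k - 1) := by ring
    rw [this, show n - k = (n - k - 1) + 1 by omega, pow_succ]
    calc (idx + 2) * B ^ (n - k - 1) ≤ (K + 3) * B ^ (n - k - 1) :=
          Nat.mul_le_mul_right _ (by omega)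
      _ = B ^ (n - k - 1) * B := by rw [hB]; ring
  have : pvV B n rstack idx + B ^ (n - k - 1) ≤ B ^ n := by
    unfold pvV
    rw [← hkdef]
    calc (idx + 1) * B ^ (n - k - 1) + pvVaux B (n - k) rstack + B ^ (n - k - 1)
        = ((idx + 1) * B ^ (n - k - 1) + B ^ (n - k - 1)) + pvVaux B (n - k) rstack := by ring
      _ ≤ B ^ (n - k) + pvVaux B (n - k) rstack := Nat.add_le_add_right hstep _
      _ = pvVaux B (n - k) rstack + B ^ (n - k) := by ring
      _ ≤ B ^ n := hbound
  omega

-- ---- bookkeeping helpers for the master lemma ----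

lemma pvAbstr_nil : pvAbstr [] = [] := rfl

lemma pvAbstr_append (us : List (Int × String)) (e : Int × String) :
    pvAbstr (us ++ [e]) = (e.1.toNat, e.2.toList) :: pvAbstr us := by
  simp [pvAbstr]

lemma pvAbstr_length (used : List (Int × String)) : (pvAbstr used).length = used.length := by
  simp [pvAbstr]

lemma pvAbstr_bound (K : Nat) (used : List (Int × String))
    (h : ∀ e ∈ used, ∃ i : Nat, e.1 = (i : Int) ∧ i ≤ K) :
    ∀ a ∈ pvAbstr used, a.1 ≤ K := by
  intro a ha
  unfold pvAbstr at ha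
  rw [List.mem_reverse] at ha
  rcases List.mem_map.mp ha with ⟨e, he, rfl⟩
  rcases h e he with ⟨i, hi, hik⟩
  simpa [hi] using hik

lemma pvLen_le_sum (used : List (Int × String)) (h : ∀ e ∈ used, e.2 ≠ "") :
    used.length ≤ (used.map (fun e => e.2.toList.length)).sum := by
  induction used with
  | nil => simp
  | cons e us ih =>
    have h1 : 1 ≤ e.2.toList.length := by
      have : e.2.toList ≠ [] := fun hc => h e (by simp) (String.toList_eq_nil_iff.mp hc)
      exact List.length_pos_of_ne_nil this
    have := ih (fun x hx => h x (List.mem_cons_of_mem _ hx))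
    simp only [List.map_cons, List.sum_cons, List.length_cons]
    omega

lemma pvV_succ_idx (B n : Nat) (rstack : List (Nat × List Char)) (idx : Nat) :
    pvV B n rstack (idx + 1) = pvV B n rstack idx + B ^ (n - rstack.length - 1) := by
  unfold pvV
  ring

lemma pvV_push (B n : Nat) (i : Nat) (p : List Char) (rstack : List (Nat × List Char))
    (h : rstack.length + 1 < n) :
    pvV B n ((i, p) :: rstack) 0 = pvV B n rstack i + B ^ (n - rstack.length - 2) := by
  unfold pvV
  simp only [pvVaux, List.length_cons]
  rw [show n - (rstack.length + 1) + 1 = n - rstack.length by omega,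
    show n - (rstack.length + 1) = n - rstack.length - 1 by omega,
    show n - rstack.length - 1 - 1 = n - rstack.length - 2 by omega]
  ring

lemma pvV_pop_le (B K n : Nat) (hB : B = K + 3) (i : Nat) (p : List Char)
    (rstack : List (Nat × List Char)) (idx : Nat)
    (h : rstack.length + 1 < n) (hidx : idx ≤ K + 1) :
    pvV B n ((i, p) :: rstack) idx + 1 ≤ pvV B n rstack (i + 1) := by
  unfold pvV
  simp only [pvVaux, List.length_cons]
  rw [show n - (rstack.length + 1) + 1 = n - rstack.length by omega,
    show n - (rstack.length + 1) = n - rstack.length - 1 by omega,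
    show n - rstack.length - 1 - 1 = n - rstack.length - 2 by omega]
  have hexp : n - rstack.length - 1 = (n - rstack.length - 2) + 1 := by omega
  have hpos : 1 ≤ B ^ (n - rstack.length - 2) := Nat.one_le_pow _ _ (by omega)
  have hkey : (idx + 1) * B ^ (n - rstack.length - 2) + 1 ≤ B ^ (n - rstack.length - 1) := by
    rw [hexp, pow_succ]
    have : (idx + 1) * B ^ (n - rstack.length - 2) + 1
        ≤ (K + 2) * B ^ (n - rstack.length - 2) + B ^ (n - rstack.length - 2) := by
      have := Nat.mul_le_mul_right (B ^ (n - rstack.length - 2)) (show idx + 1 ≤ K + 2 by omega)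
      omega
    calc (idx + 1) * B ^ (n - rstack.length - 2) + 1
        ≤ (K + 2) * B ^ (n - rstack.length - 2) + B ^ (n - rstack.length - 2) := this
      _ = B ^ (n - rstack.length - 2) * (K + 3) := by ring
      _ = B ^ (n - rstack.length - 2) * B := by rw [hB]
  nlinarith [hkey]

lemma pvK_bound (d : PySem.Dict Char (List String)) (c : Char) (v : List String)
    (h : d.get? c = some v) : v.length ≤ pvK d := by
  have hv : v ∈ d.values :=
    List.mem_map_of_mem (PySem.Dict.mem_items_of_get?_eq_some _ h)
  exact List.le_sum_of_mem (List.mem_map_of_mem hv)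

lemma pvPd_hne (d : PySem.Dict Char (List String)) (cs : List Char) (hd : pvHneD d) :
    pvHneP (pvPd d cs) := by
  intro q p hp
  unfold pvPd at hp
  cases hq : cs[q]? with
  | none => rw [hq] at hp; simp at hp
  | some c =>
    rw [hq] at hp
    simp only at hp
    rcases List.mem_map.mp hp with ⟨x, hx, rfl⟩
    cases hg : d.get? c with
    | none =>
      rw [PySem.Dict.getD_eq_get?_getD, hg] at hx
      simp at hx
    | some v =>
      rw [PySem.Dict.getD_eq_get?_getD, hg] at hx
      simp only [Option.getD_some] at hx
      exact fun hnil => hd c v hg x hx (String.toList_eq_nil_iff.mp hnil)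

-- ---- the master lemma: A's machine computes pvResT ----

lemma pvLoop_eq (d : PySem.Dict Char (List String)) (design : String) (hd : pvHneD d) :
    ∀ (fuel : Nat) (used : List (Int × String)) (q idx : Nat),
      q ≤ design.toList.length →
      q = (used.map (fun e => e.2.toList.length)).sum →
      (∀ e ∈ used, ∃ i : Nat, e.1 = (i : Int) ∧ i ≤ pvK d) →
      (∀ e ∈ used, e.2 ≠ "") →
      idx ≤ pvK d + 1 →
      1 ≤ fuel →
      (q < design.toList.length →
        pvB d ^ design.toList.length < fuel + pvV (pvB d) design.toList.length (pvAbstr used) idx) →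
      pvCheckLoop d design fuel used (q : Int) (idx : Int) =
        pvResT design.toList (pvPd d design.toList) (pvAbstr used) q idx := by
  intro fuel
  induction fuel with
  | zero =>
    intro used q idx _ _ _ _ _ h1 _
    exact absurd h1 (by omega)
  | succ fuel ih =>
    intro used q idx hqn hsum hidxs hne_used hidx h1 hfuel
    clear h1
    by_cases hq : q < design.toList.length
    case neg =>
      simp only [pvCheckLoop, PySem.Str.len_eq]
      rw [if_neg (by omega : ¬ ((q : Int) < (design.toList.length : Int)))]
      rw [pvResT, if_pos (by omega)]
    case pos =>
      have hVlt : pvV (pvB d) design.toList.length (pvAbstr used) idx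
          < pvB d ^ design.toList.length := by
        apply pvV_lt (pvB d) (pvK d) _ rfl _ _ _ (pvAbstr_bound (pvK d) used hidxs) hidx
        rw [pvAbstr_length]
        have := pvLen_le_sum used hne_used
        omega
      have hfge1 : pvB d ^ design.toList.length < fuel + 1
            + pvV (pvB d) design.toList.length (pvAbstr used) idx := hfuel hq
      have hget : PySem.Str.pyGet? design (q : Int) = some design.toList[q] := by
        rw [PySem.Str.pyGet?_natCast]
        exact List.getElem?_eq_getElem hq
      simp only [pvCheckLoop, PySem.Str.len_eq]
      rw [if_pos (by omega : ((q : Int) < (design.toList.length : Int))),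
        if_neg (by omega : ¬ ((q : Int) < 0)), hget]
      rw [pvResT, if_neg (show ¬ (design.toList.length ≤ q) by omega)]
      by_cases hcont : d.contains design.toList[q]
      case neg =>
        rw [Bool.not_eq_true] at hcont
        simp only [hcont, Bool.not_false, if_true]
        have hgnone : d.get? design.toList[q] = none :=
          (PySem.Dict.get?_eq_none_iff_contains d _).mpr hcont
        have hPnil : pvPd d design.toList q = [] := by
          unfold pvPd
          rw [List.getElem?_eq_getElem hq]
          simp only
          rw [PySem.Dict.getD_eq_get?_getD, hgnone]
          rfl
        have htry : pvTry design.toList (pvPd d design.toList) q idx = false := by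
          rw [pvTry, hPnil]
          simp
        cases used using List.reverseRecOn with
        | nil =>
          rw [show PySem.List.pop? ([] : List (Int × String)) = none from rfl]
          rw [pvAbstr_nil, pvRes, htry]
        | append_singleton us e =>
          obtain ⟨ei, ep⟩ := e
          rw [PySem.List.pop?_last]
          simp only
          rcases hidxs (ei, ep) (by simp) with ⟨iN, hiN, hiK⟩
          simp only at hiN
          have hepne : ep ≠ "" := hne_used (ei, ep) (by simp)
          have hep1 : 1 ≤ ep.toList.length :=
            List.length_pos_of_ne_nil (fun hc => hepne (String.toList_eq_nil_iff.mp hc))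
          have hsum' : q = (us.map (fun e => e.2.toList.length)).sum + ep.toList.length := by
            rw [hsum]; simp
          have hklt : us.length + 1 < design.toList.length := by
            have := pvLen_le_sum us (fun x hx => hne_used x (List.mem_append_left _ hx))
            omega
          have harg1 : (q : Int) - ((ep.toList.length : Nat) : Int)
              = ((q - ep.toList.length : Nat) : Int) := by omega
          have harg2 : ei + 1 = ((iN + 1 : Nat) : Int) := by rw [hiN]; push_cast; ring
          rw [harg1, harg2]
          have hVpop := pvV_pop_le (pvB d) (pvK d) design.toList.length rfl iN ep.toList
            (pvAbstr us) idx (by rw [pvAbstr_length]; exact hklt) hidx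
          rw [ih us (q - ep.toList.length) (iN + 1)
            (by omega)
            (by omega)
            (fun x hx => hidxs x (List.mem_append_left _ hx))
            (fun x hx => hne_used x (List.mem_append_left _ hx))
            (by omega)
            (by rw [pvAbstr_append] at hVlt hfge1; simp only [hiN, Int.toNat_natCast] at hVlt hfge1; omega)
            (by
              intro _
              rw [pvAbstr_append] at hfge1
              simp only [hiN, Int.toNat_natCast] at hfge1
              omega)]
          rw [pvAbstr_append]
          simp only [hiN, Int.toNat_natCast]
          rw [pvRes, htry, Bool.false_or, pvResT, if_neg (by omega)]
      case pos =>
        obtain ⟨lst, hglst⟩ : ∃ v, d.get? design.toList[q] = some v := by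
          have hiso := PySem.Dict.contains_eq_isSome_get? (d := d) (k := design.toList[q])
          rw [hcont] at hiso
          exact Option.isSome_iff_exists.mp hiso.symm
        simp only [hcont, Bool.not_true, Bool.false_eq_true, if_false]
        rw [hglst]
        simp only [Option.getD_some, PySem.List.len_eq]
        have hPq : pvPd d design.toList q = lst.map String.toList := by
          unfold pvPd
          rw [List.getElem?_eq_getElem hq]
          simp only
          rw [PySem.Dict.getD_eq_get?_getD, hglst]
          rfl
        have hlstK : lst.length ≤ pvK d := pvK_bound d _ lst hglst
        have hlstne : ∀ x ∈ lst, x ≠ "" := hd _ lst hglst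
        by_cases hil : lst.length ≤ idx
        case pos =>
          rw [if_pos (by exact_mod_cast hil)]
          have htry : pvTry design.toList (pvPd d design.toList) q idx = false := by
            apply pvTry_empty
            rw [hPq]
            simpa using hil
          cases used using List.reverseRecOn with
          | nil =>
            rw [show PySem.List.pop? ([] : List (Int × String)) = none from rfl]
            rw [pvAbstr_nil, pvRes, htry]
          | append_singleton us e =>
            obtain ⟨ei, ep⟩ := e
            rw [PySem.List.pop?_last]
            simp only
            rcases hidxs (ei, ep) (by simp) with ⟨iN, hiN, hiK⟩
            simp only at hiN
            have hepne : ep ≠ "" := hne_used (ei, ep) (by simp)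
            have hep1 : 1 ≤ ep.toList.length :=
              List.length_pos_of_ne_nil (fun hc => hepne (String.toList_eq_nil_iff.mp hc))
            have hsum' : q = (us.map (fun e => e.2.toList.length)).sum + ep.toList.length := by
              rw [hsum]; simp
            have hklt : us.length + 1 < design.toList.length := by
              have := pvLen_le_sum us (fun x hx => hne_used x (List.mem_append_left _ hx))
              omega
            have harg1 : (q : Int) - ((ep.toList.length : Nat) : Int)
                = ((q - ep.toList.length : Nat) : Int) := by omega
            have harg2 : ei + 1 = ((iN + 1 : Nat) : Int) := by rw [hiN]; push_cast; ring
            rw [harg1, harg2]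
            have hVpop := pvV_pop_le (pvB d) (pvK d) design.toList.length rfl iN ep.toList
              (pvAbstr us) idx (by rw [pvAbstr_length]; exact hklt) hidx
            rw [ih us (q - ep.toList.length) (iN + 1)
              (by omega)
              (by omega)
              (fun x hx => hidxs x (List.mem_append_left _ hx))
              (fun x hx => hne_used x (List.mem_append_left _ hx))
              (by omega)
              (by rw [pvAbstr_append] at hVlt hfge1; simp only [hiN, Int.toNat_natCast] at hVlt hfge1; omega)
              (by
                intro _
                rw [pvAbstr_append] at hfge1
                simp only [hiN, Int.toNat_natCast] at hfge1
                omega)]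
            rw [pvAbstr_append]
            simp only [hiN, Int.toNat_natCast]
            rw [pvRes, htry, Bool.false_or, pvResT, if_neg (by omega)]
        case neg =>
          rw [if_neg (by exact_mod_cast hil)]
          have hidxlt : idx < lst.length := by omega
          have hgetp : PySem.List.pyGet? lst (idx : Int) = some lst[idx] := by
            rw [PySem.List.pyGet?_natCast]
            exact List.getElem?_eq_getElem hidxlt
          rw [hgetp]
          simp only
          have hppat : (pvPd d design.toList q)[idx]? = some lst[idx].toList := by
            rw [hPq]
            simp [List.getElem?_map, List.getElem?_eq_getElem hidxlt]
          have hswb : PySem.Str.startswith (PySem.Str.slice design (some (q : Int)) none) lst[idx]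
              = pvSW design.toList q lst[idx].toList := by
            simp [pvSW, pysem]
          rw [hswb]
          have hpatne : lst[idx].toList ≠ [] := fun hc =>
            hlstne lst[idx] (List.getElem_mem hidxlt) (String.toList_eq_nil_iff.mp hc)
          have hpat1 : 1 ≤ lst[idx].toList.length := List.length_pos_of_ne_nil hpatne
          by_cases hsw : pvSW design.toList q lst[idx].toList = true
          case pos =>
            rw [hsw, if_pos rfl]
            have hq2 : q + lst[idx].toList.length ≤ design.toList.length := by
              have hpre := (PySem.Chars.startswith_iff _ _).mp hsw
              have := hpre.length_le
              rw [List.length_drop] at this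
              omega
            have harg1 : (q : Int) + ((lst[idx].toList.length : Nat) : Int)
                = ((q + lst[idx].toList.length : Nat) : Int) := by push_cast; ring
            have harg2 : (0 : Int) = ((0 : Nat) : Int) := rfl
            rw [harg1, harg2]
            have hlen2 : used.length + 1 ≤ q + lst[idx].toList.length := by
              have := pvLen_le_sum used hne_used
              omega
            rw [ih (used ++ [((idx : Int), lst[idx])]) (q + lst[idx].toList.length) 0
              (by omega)
              (by rw [hsum]; simp)
              (by
                intro x hx
                rcases List.mem_append.mp hx with hx | hx
                · exact hidxs x hx
                · rw [List.mem_singleton.mp hx]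
                  exact ⟨idx, rfl, by omega⟩)
              (by
                intro x hx
                rcases List.mem_append.mp hx with hx | hx
                · exact hne_used x hx
                · rw [List.mem_singleton.mp hx]
                  intro hc
                  have hc' : lst[idx] = "" := hc
                  rw [hc'] at hpatne
                  exact hpatne rfl)
              (by omega)
              (by omega)
              (by
                intro hlt2
                rw [pvAbstr_append]
                simp only [Int.toNat_natCast]
                rw [pvV_push _ _ _ _ _ (by rw [pvAbstr_length]; omega)]
                have hpos : 1 ≤ pvB d ^ (design.toList.length - (pvAbstr used).length - 2) :=
                  Nat.one_le_pow _ _ (by unfold pvB; omega)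
                omega)]
            rw [pvAbstr_append]
            simp only [Int.toNat_natCast]
            rw [← pvRes_push design.toList (pvPd d design.toList) (pvPd_hne d design.toList hd)
              (pvAbstr used) q idx lst[idx].toList hq hppat hsw]
            rw [pvResT, if_neg (show ¬ (design.toList.length ≤ q) by omega)]
          case neg =>
            rw [Bool.not_eq_true] at hsw
            rw [hsw, if_neg (by simp)]
            have harg : (idx : Int) + 1 = ((idx + 1 : Nat) : Int) := by push_cast; ring
            rw [harg]
            rw [ih used q (idx + 1) hqn hsum hidxs hne_used
              (by omega)
              (by omega)
              (by
                intro _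
                rw [pvV_succ_idx]
                have hpos : 1 ≤ pvB d ^ (design.toList.length - (pvAbstr used).length - 1) :=
                  Nat.one_le_pow _ _ (by unfold pvB; omega)
                omega)]
            rw [pvResT, if_neg (by omega)]
            apply pvRes_congr_try
            rw [pvTry_succ _ _ _ _ _ hppat, hsw, Bool.false_and, Bool.false_or]
  

lemma pvCheckA_eq_can (d : PySem.Dict Char (List String)) (design : String) (hd : pvHneD d) :
    pvCheckA d design = pvCan design.toList (pvPd d design.toList) 0 := by
  unfold pvCheckA
  have hB1 : 1 < pvB d := by unfold pvB; omega
  have hfuel : pvB d ^ design.toList.length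
      < ((d.values.map List.length).sum + 3) ^ (design.toList.length + 1) + 1 := by
    have h2 : pvB d ^ design.toList.length < pvB d ^ (design.toList.length + 1) :=
      Nat.pow_lt_pow_right hB1 (by omega)
    have h3 : pvB d ^ (design.toList.length + 1)
        = ((d.values.map List.length).sum + 3) ^ (design.toList.length + 1) := rfl
    omega
  have h := pvLoop_eq d design hd
    (((d.values.map List.length).sum + 3) ^ (design.toList.length + 1) + 1) [] 0 0
    (by omega) (by simp) (by simp) (by simp) (by omega) (by omega)
    (fun _ => by
      have hV : 0 ≤ pvV (pvB d) design.toList.length (pvAbstr []) 0 := Nat.zero_le _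
      omega)
  rw [show (((0 : Nat)) : Int) = (0 : Int) from rfl] at h
  rw [h, pvResT, pvAbstr_nil]
  by_cases hn : design.toList.length ≤ 0
  · rw [if_pos hn, pvCan_of_ge _ _ _ hn]
  · rw [if_neg hn, pvRes,
      pvCan_eq_try design.toList _ (pvPd_hne d design.toList hd) 0 (by omega)]

-- ---- B's dp computes pvCan over the flat pool ----

lemma pvHneP_flat (patterns : List String) (hne : ∀ p ∈ patterns, p ≠ "") :
    pvHneP (fun _ => patterns.map String.toList) := by
  intro q p hp
  rcases List.mem_map.mp hp with ⟨x, hx, rfl⟩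
  intro h
  exact hne x hx (String.toList_eq_nil_iff.mp h)

lemma pvDp_spec (design : String) (patterns : List String) (hne : ∀ p ∈ patterns, p ≠ "") :
    ∀ m, m ≤ design.toList.length →
      ((PySem.List.pyRange 1 ((m : Int) + 1) 1).foldl
        (fun (dp : List Bool) k =>
          dp ++ [patterns.any (fun p =>
            PySem.Str.startswith
              (PySem.Str.slice design (some ((design.toList.length : Int) - k)) none) p
              && PySem.List.pyGetD dp (k - PySem.Str.len p) false)])
        [true]).length = m + 1 ∧
      ∀ k, k ≤ m →
        ((PySem.List.pyRange 1 ((m : Int) + 1) 1).foldl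
          (fun (dp : List Bool) k =>
            dp ++ [patterns.any (fun p =>
              PySem.Str.startswith
                (PySem.Str.slice design (some ((design.toList.length : Int) - k)) none) p
                && PySem.List.pyGetD dp (k - PySem.Str.len p) false)])
          [true]).getD k false =
          pvCan design.toList (fun _ => patterns.map String.toList)
            (design.toList.length - k) := by
  intro m
  induction m with
  | zero =>
    intro _
    rw [show ((0 : Nat) : Int) + 1 = 1 by norm_num, PySem.List.pyRange_one_eq_nil le_rfl]
    simp only [List.foldl_nil]
    refine ⟨rfl, ?_⟩
    intro k hk
    interval_cases k
    rw [pvCan_of_ge _ _ _ (by omega)]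
    rfl
  | succ m ih =>
    intro hm
    obtain ⟨hlen, hval⟩ := ih (by omega)
    have hrange : PySem.List.pyRange 1 (((m + 1 : Nat) : Int) + 1) 1 =
        PySem.List.pyRange 1 ((m : Int) + 1) 1 ++ [(m : Int) + 1] := by
      have h := PySem.List.pyRange_one_succ_right (a := 1) (b := (m : Int) + 1) (by omega)
      have hcast : ((m + 1 : Nat) : Int) + 1 = ((m : Int) + 1) + 1 := by push_cast; ring
      rw [hcast, h]
    rw [hrange, List.foldl_append]
    set dpm := (PySem.List.pyRange 1 ((m : Int) + 1) 1).foldl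
      (fun (dp : List Bool) k =>
        dp ++ [patterns.any (fun p =>
          PySem.Str.startswith
            (PySem.Str.slice design (some ((design.toList.length : Int) - k)) none) p
            && PySem.List.pyGetD dp (k - PySem.Str.len p) false)])
      [true] with hdpm
    simp only [List.foldl_cons, List.foldl_nil]
    set n := design.toList.length with hn
    set v := patterns.any (fun p =>
      PySem.Str.startswith
        (PySem.Str.slice design (some ((n : Int) - ((m : Int) + 1))) none) p
        && PySem.List.pyGetD dpm (((m : Int) + 1) - PySem.Str.len p) false) with hv
    have hq : n - (m + 1) < n := by omega
    have hvcan : v = pvCan design.toList (fun _ => patterns.map String.toList) (n - (m + 1)) := by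
      rw [pvCan_unfold _ _ (pvHneP_flat patterns hne), List.any_map]
      rw [decide_eq_false (by omega : ¬ n ≤ n - (m + 1)), Bool.false_or, hv]
      apply PySem.List.any_congr_mem
      intro p hp
      simp only [Function.comp_apply]
      have hpl : p.toList ≠ [] := fun h => hne p hp (String.toList_eq_nil_iff.mp h)
      have hcast : (n : Int) - ((m : Int) + 1) = ((n - (m + 1) : Nat) : Int) := by
        push_cast [Nat.cast_sub (by omega : m + 1 ≤ n)]
        ring
      have hsw : PySem.Str.startswith
          (PySem.Str.slice design (some ((n : Int) - ((m : Int) + 1))) none) p =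
          pvSW design.toList (n - (m + 1)) p.toList := by
        rw [hcast]
        simp [pvSW, PySem.List.slice_from_natCast]
      rw [hsw]
      by_cases hb : pvSW design.toList (n - (m + 1)) p.toList = true
      · rw [hb]
        simp only [Bool.true_and]
        have hpre := (PySem.Chars.startswith_iff _ _).mp hb
        have hle : p.toList.length ≤ m + 1 := by
          have := hpre.length_le
          rw [List.length_drop] at this
          omega
        have hp1 : 1 ≤ p.toList.length := List.length_pos_of_ne_nil hpl
        have hidx : ((m : Int) + 1) - PySem.Str.len p =
            ((m + 1 - p.toList.length : Nat) : Int) := by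
          rw [PySem.Str.len_eq]
          omega
        rw [hidx, PySem.List.pyGetD_natCast, hval (m + 1 - p.toList.length) (by omega)]
        congr 1
        omega
      · rw [Bool.not_eq_true] at hb
        rw [hb]
        simp only [Bool.false_and]
    refine ⟨by simp [hlen], ?_⟩
    intro k hk
    by_cases hkm : k ≤ m
    · rw [List.getD_append _ _ _ _ (by omega), hval k hkm]
    · have hk1 : k = m + 1 := by omega
      subst hk1
      have : (dpm ++ [v]).getD (m + 1) false = v := by
        rw [show m + 1 = dpm.length by omega]
        simp [List.getD]
      rw [this, hvcan]

lemma pvCanBuild_eq_can (design : String) (patterns : List String)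
    (hne : ∀ p ∈ patterns, p ≠ "") :
    pvCanBuild design patterns =
      pvCan design.toList (fun _ => patterns.map String.toList) 0 := by
  unfold pvCanBuild
  dsimp only
  have hn : PySem.Str.len design = ((design.toList.length : Nat) : Int) := by
    rw [PySem.Str.len_eq, String.length_toList]
  rw [hn]
  obtain ⟨hlen, hval⟩ := pvDp_spec design patterns hne design.toList.length le_rfl
  rw [PySem.List.pyGetD_natCast]
  have := hval design.toList.length le_rfl
  rw [show design.toList.length - design.toList.length = 0 by omega] at this
  exact this

-- ---- source congruence and grouping ----

lemma pvGen_congr (cs : List Char) (P1 P2 : Nat → List (List Char))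
    (H : ∀ q, q < cs.length → ∀ g : List Char → Bool,
      (P1 q).any (fun p => pvSW cs q p && g p) = (P2 q).any (fun p => pvSW cs q p && g p)) :
    ∀ f q, pvGen cs P1 f q = pvGen cs P2 f q := by
  intro f
  induction f with
  | zero => intro q; rfl
  | succ f ih =>
    intro q
    simp only [pvGen]
    by_cases hq : cs.length ≤ q
    · simp [hq]
    · congr 1
      have h1 : (P1 q).any (fun p => pvSW cs q p && pvGen cs P1 f (q + p.length))
          = (P1 q).any (fun p => pvSW cs q p && pvGen cs P2 f (q + p.length)) := by
        apply PySem.List.any_congr_mem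
        intro p _
        rw [ih]
      rw [h1]
      exact H q (Nat.lt_of_not_le hq) (fun p => pvGen cs P2 f (q + p.length))

lemma pvGroupD_getD (kept : List String) (c : Char) :
    (pvGroupD kept).getD c [] = kept.filter (fun p => pvKey p == c) := by
  unfold pvGroupD
  rw [show kept.foldl (fun d p => d.modify (pvKey p) [] (· ++ [p]))
        (PySem.Dict.empty : PySem.Dict Char (List String))
      = (kept.map (fun p => (pvKey p, p))).foldl
          (fun d pr => d.modify pr.1 [] (· ++ [pr.2])) PySem.Dict.empty
    from by rw [List.foldl_map]]
  rw [PySem.Dict.getD_foldl_modify_append]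
  simp [List.filter_map, Function.comp_def]

lemma pvGroupD_hne (kept : List String) (hne : ∀ p ∈ kept, p ≠ "") :
    pvHneD (pvGroupD kept) := by
  intro c v hgv p hp
  have hv : v = kept.filter (fun p => pvKey p == c) := by
    have h := pvGroupD_getD kept c
    rw [PySem.Dict.getD_eq_get?_getD, hgv] at h
    exact h
  exact hne p (List.mem_of_mem_filter (hv ▸ hp))

lemma pvPd_group_any (cs : List Char) (kept : List String) (hne : ∀ p ∈ kept, p ≠ "")
    (q : Nat) (hq : q < cs.length) (g : List Char → Bool) :
    (pvPd (pvGroupD kept) cs q).any (fun p => pvSW cs q p && g p) =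
      (kept.map String.toList).any (fun p => pvSW cs q p && g p) := by
  unfold pvPd
  rw [List.getElem?_eq_getElem hq]
  simp only
  rw [pvGroupD_getD]
  rw [List.any_map, List.any_map, List.any_filter]
  apply PySem.List.any_congr_mem
  intro x hx
  by_cases hkey : pvKey x == cs[q]
  · rw [hkey, Bool.true_and]
  · rw [Bool.not_eq_true] at hkey
    rw [hkey, Bool.false_and]
    cases hc : x.toList with
    | nil => exact absurd (String.toList_eq_nil_iff.mp hc) (hne x hx)
    | cons h t =>
      have hhd : h ≠ cs[q] := by
        have hkx : pvKey x = h := by simp [pvKey, hc]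
        rw [hkx] at hkey
        intro he
        rw [he] at hkey
        simp at hkey
      have hsw : pvSW cs q x.toList = false := by
        simp only [pvSW, hc]
        cases hb : PySem.Chars.startswith (cs.drop q) (h :: t) with
        | false => rfl
        | true =>
          exfalso
          have hpre := (PySem.Chars.startswith_iff _ _).mp hb
          rw [List.drop_eq_getElem_cons hq, List.cons_prefix_cons] at hpre
          exact hhd hpre.1
      simp [hsw]

-- ---- empty design ----

lemma pvCheckA_empty (d : PySem.Dict Char (List String)) : pvCheckA d "" = true := by
  simp [pvCheckA, pvCheckLoop, PySem.Str.len_eq]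

lemma pvCanBuild_empty (patterns : List String) : pvCanBuild "" patterns = true := by
  simp [pvCanBuild, PySem.Str.len_eq, PySem.List.pyRange_one_eq_nil, PySem.List.pyGetD_zero_cons]

/-- the two checks agree whenever the dict is the first-letter grouping of `kept` -/
lemma pvCheck_agree (kept : List String) (hne : ∀ p ∈ kept, p ≠ "") (p : String) :
    pvCheckA (pvGroupD kept) p = pvCanBuild p kept := by
  by_cases hp : p = ""
  · subst hp
    rw [pvCheckA_empty, pvCanBuild_empty]
  · rw [pvCheckA_eq_can _ _ (pvGroupD_hne kept hne), pvCanBuild_eq_can _ _ hne]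
    unfold pvCan
    exact pvGen_congr _ _ _ (fun q hq g => pvPd_group_any p.toList kept hne q hq g) _ _

-- ---- the outer loops ----

lemma pvOuter (l : List String) :
    ∀ (kept : List String), (∀ p ∈ kept, p ≠ "") →
      l.foldl
        (fun d p =>
          if !(pvCheckA d p) then
            match PySem.Str.pyGet? p 0 with
            | none => d
            | some c => d.modify c [] (· ++ [p])
          else d)
        (pvGroupD kept) =
        pvGroupD (l.foldl (fun kept p => if !(pvCanBuild p kept) then kept ++ [p] else kept) kept)
      ∧ (∀ p ∈ l.foldl (fun kept p => if !(pvCanBuild p kept) then kept ++ [p] else kept) kept,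
          p ≠ "") := by
  induction l with
  | nil => intro kept hne; exact ⟨rfl, hne⟩
  | cons p l ih =>
    intro kept hne
    simp only [List.foldl_cons]
    rw [pvCheck_agree kept hne p]
    by_cases hb : pvCanBuild p kept
    · rw [hb]
      simp only [Bool.not_true, Bool.false_eq_true, if_false]
      exact ih kept hne
    · rw [Bool.not_eq_true] at hb
      rw [hb]
      simp only [Bool.not_false, if_true]
      have hpne : p ≠ "" := by
        intro h
        rw [h, pvCanBuild_empty] at hb
        exact Bool.noConfusion hb
      have hget : PySem.Str.pyGet? p 0 = some (pvKey p) := by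
        cases hc : p.toList with
        | nil => exact absurd (String.toList_eq_nil_iff.mp hc) hpne
        | cons h t => simp [pvKey, hc]
      rw [hget]
      have hstep : ((pvGroupD kept).modify (pvKey p) [] (· ++ [p])) = pvGroupD (kept ++ [p]) := by
        unfold pvGroupD
        rw [List.foldl_append]
        rfl
      rw [show ((match some (pvKey p) with
            | none => pvGroupD kept
            | some c => (pvGroupD kept).modify c [] (· ++ [p])) : PySem.Dict Char (List String))
          = (pvGroupD kept).modify (pvKey p) [] (· ++ [p]) from rfl, hstep]
      exact ih (kept ++ [p]) (by
        intro x hx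
        rcases List.mem_append.mp hx with hx | hx
        · exact hne x hx
        · rw [List.mem_singleton.mp hx]; exact hpne)

lemma pvGrouped_eq (kept : List String) (hne : ∀ p ∈ kept, p ≠ "")
    (d0 : PySem.Dict Char (List String)) :
    kept.foldl
      (fun d p =>
        match PySem.Str.pyGet? p 0 with
        | none => d
        | some c => d.modify c [] (· ++ [p])) d0 =
      kept.foldl (fun d p => d.modify (pvKey p) [] (· ++ [p])) d0 := by
  apply PySem.List.foldl_congr_mem
  intro d p hp
  have hpne := hne p hp
  cases hc : p.toList with
  | nil => exact absurd (String.toList_eq_nil_iff.mp hc) hpne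
  | cons h t =>
    have hget : PySem.Str.pyGet? p 0 = some h := by simp [hc]
    have hkey : pvKey p = h := by simp [pvKey, hc]
    rw [hget, hkey]

-- ===== VERDICT (by name: the statement is the Claim_ definition above) =====
theorem mormalize_available_patterns_py_spec : Claim_equal_mormalize_available_patterns_py := by
  intro aps _
  unfold Spec_mormalize_available_patterns_py
  unfold mormalize_available_patterns_py mormalize_available_patterns_py_alt
  dsimp only
  rw [show (PySem.Dict.empty : PySem.Dict Char (List String)) = pvGroupD [] from rfl]
  have h := pvOuter (PySem.List.sorted aps (fun s => PySem.Str.len s)) [] (by simp)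
  rw [h.1, pvGrouped_eq _ h.2 (pvGroupD [])]
  rfl
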